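-- pv_equiv track=rewrite | github.com/omarfoq/Counting-Bloom-filter | util.py | metric_performance
-- ===== SOURCE A (Python) =====
-- def metric_performance(items_estimations,n_cache_slots):
--     rank_est=[]
--     n_items=len(items_estimations)
--     for i in range(n_items):
--         rank_est.append((i,items_estimations[i]))
--     rank_est= sorted(rank_est, key= lambda item: item[1])
--     rank_est.reverse()
--     items_detected=set()
--     most_popular_items=set()
--     for i in range(n_cache_slots):
--         items_detected.add(rank_est[i][0])
--         most_popular_items.add(i)
--
--     return n_cache_slots- len(items_detected.intersection(most_popular_items))
-- ===== SOURCE B (Python) =====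
-- def metric_performance(items_estimations, n_cache_slots):
--     # no sorting: find the k-th largest (value, index) pair by iterative quickselect,
--     # then count how many of the first k indices reach that threshold
--     k = n_cache_slots
--     if k <= 0:
--         return k
--     pairs = [(v, i) for i, v in enumerate(items_estimations)]
--     m = k - 1
--     while True:
--         p = pairs[len(pairs) // 2]
--         gt = [y for y in pairs if y > p]
--         if m < len(gt):
--             pairs = gt
--         elif m == len(gt):
--             t = p
--             break
--         else:
--             pairs = [y for y in pairs if y < p]
--             m -= len(gt) + 1
--     hits = 0
--     for i in range(k):
--         if (items_estimations[i], i) >= t: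
--             hits += 1
--     return k - hits
-- ===== Notes on version B (the rewrite author's own statement) =====
-- stated objective: faster
-- what changed: replaces A's sort-by-value + reverse + set intersection with an iterative quickselect for the k-th largest (value, index) pair followed by a single counting pass over the first k indices
import Mathlib
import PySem

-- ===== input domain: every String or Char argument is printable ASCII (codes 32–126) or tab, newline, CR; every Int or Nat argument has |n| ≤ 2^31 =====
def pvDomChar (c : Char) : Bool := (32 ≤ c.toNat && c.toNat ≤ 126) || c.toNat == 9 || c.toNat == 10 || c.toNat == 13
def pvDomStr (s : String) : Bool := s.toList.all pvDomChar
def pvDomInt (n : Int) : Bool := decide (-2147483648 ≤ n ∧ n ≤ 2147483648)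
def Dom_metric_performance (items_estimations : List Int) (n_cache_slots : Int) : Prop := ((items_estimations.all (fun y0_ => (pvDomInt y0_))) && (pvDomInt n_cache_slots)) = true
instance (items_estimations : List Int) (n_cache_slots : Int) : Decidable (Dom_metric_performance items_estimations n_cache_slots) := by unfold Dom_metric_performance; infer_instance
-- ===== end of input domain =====

-- B replaces A's sort/reverse/set-intersection with an iterative quickselect for the k-th largest
-- (value, index) pair followed by one counting pass (alternative algorithm, same results).


-- ===== PORT A =====
def metric_performance (items_estimations : List Int) (n_cache_slots : Int) : Int :=
  let n_items : Int := PySem.List.len items_estimations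
  let rank_est : List (Int × Int) :=
    (PySem.List.pyRange 0 n_items 1).foldl
      (fun acc i => acc ++ [(i, PySem.List.pyGetD items_estimations i 0)]) []
  let rank_est := PySem.List.sorted rank_est (fun item => item.2) false
  let rank_est := rank_est.reverse
  let sets : PySem.Set Int × PySem.Set Int :=
    (PySem.List.pyRange 0 n_cache_slots 1).foldl
      (fun st i =>
        (PySem.Set.add st.1 (PySem.List.pyGetD rank_est i (0, 0)).1,
         PySem.Set.add st.2 i))
      (PySem.Set.empty, PySem.Set.empty)
  n_cache_slots - PySem.Set.len (PySem.Set.inter sets.1 sets.2)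

-- ===== PORT B =====
-- Python's lexicographic '<' on (value, index) int pairs
def pvLt (a b : Int × Int) : Bool :=
  decide (a.1 < b.1) || (decide (a.1 = b.1) && decide (a.2 < b.2))

-- B's while-loop: quickselect for the m-th largest pair. The list strictly shrinks every
-- iteration, so its initial length is enough fuel (the guards only make the recursion
-- total: Python raises IndexError on the empty list, which Pre_ excludes)
def pvKthFuel : Nat → List (Int × Int) → Int → Int × Int
  | 0, _, _ => (0, 0)
  | fuel + 1, pairs, m =>
    if pairs.length = 0 then (0, 0)
    else
      let p := PySem.List.pyGetD pairs (PySem.Int.floordiv (PySem.List.len pairs) 2) (0, 0)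
      let gt := pairs.filter (fun y => pvLt p y)
      if m < PySem.List.len gt then pvKthFuel fuel gt m
      else if m = PySem.List.len gt then p
      else pvKthFuel fuel (pairs.filter (fun y => pvLt y p)) (m - PySem.List.len gt - 1)

def pvKth (pairs : List (Int × Int)) (m : Int) : Int × Int :=
  pvKthFuel pairs.length pairs m

def metric_performance_alt (items_estimations : List Int) (n_cache_slots : Int) : Int :=
  if n_cache_slots ≤ 0 then n_cache_slots
  else
    let pairs := (PySem.List.enumerate items_estimations 0).map (fun iv => (iv.2, iv.1))
    let t := pvKth pairs (n_cache_slots - 1)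
    let hits :=
      (PySem.List.pyRange 0 n_cache_slots 1).foldl
        (fun hits i =>
          if t.1 < PySem.List.pyGetD items_estimations i 0 ∨
             (PySem.List.pyGetD items_estimations i 0 = t.1 ∧ t.2 ≤ i) then hits + 1 else hits)
        0
    n_cache_slots - hits

-- ===== PRECONDITION & SPEC =====
-- Pre_ excludes exactly the inputs where A raises IndexError: n_cache_slots larger than the list length.
def Pre_metric_performance (items_estimations : List Int) (n_cache_slots : Int) : Prop :=
  n_cache_slots ≤ (items_estimations.length : Int)
instance (items_estimations : List Int) (n_cache_slots : Int) : Decidable (Pre_metric_performance items_estimations n_cache_slots) := by unfold Pre_metric_performance; infer_instance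
def pvWitness_metric_performance : List Int × Int := ([3, 1, 2, 1], 2)

def Spec_metric_performance (items_estimations : List Int) (n_cache_slots : Int) (out : Int) : Prop := out = metric_performance_alt items_estimations n_cache_slots
instance (items_estimations : List Int) (n_cache_slots : Int) (out : Int) : Decidable (Spec_metric_performance items_estimations n_cache_slots out) := by unfold Spec_metric_performance; infer_instance

-- ===== CLAIM (what is proved, stated in full; the proofs are below) =====
def Claim_equal_metric_performance : Prop := ∀ (items_estimations : List Int) (n_cache_slots : Int), Dom_metric_performance items_estimations n_cache_slots → Pre_metric_performance items_estimations n_cache_slots → Spec_metric_performance items_estimations n_cache_slots (metric_performance items_estimations n_cache_slots)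

-- ===== LEMMAS AND PROOFS =====

-- the strict "greater in the reversed stable sort" order on (index, value) pairs: value first, index breaks ties
def pvR (a b : Int × Int) : Bool :=
  decide (a.2 < b.2) || (decide (a.2 = b.2) && decide (a.1 < b.1))

theorem pvR_irrefl (a : Int × Int) : pvR a a = false := by simp [pvR]

theorem pvR_asymm {a b : Int × Int} (h : pvR a b = true) : pvR b a = false := by
  simp [pvR] at *; omega

theorem pvR_trans_snd {a b c : Int × Int} (h : a.2 < b.2) (h2 : pvR b c = true) : pvR a c = true := by
  simp [pvR] at *; omega

-- basic order facts for pvLt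
theorem pvLt_irrefl (a : Int × Int) : pvLt a a = false := by simp [pvLt]

theorem pvLt_asymm {a b : Int × Int} (h : pvLt a b = true) : pvLt b a = false := by
  simp [pvLt] at *; omega

theorem pvLt_trans {a b c : Int × Int} (h1 : pvLt a b = true) (h2 : pvLt b c = true) :
    pvLt a c = true := by
  simp [pvLt] at *; omega

theorem pvLt_connex {a b : Int × Int} (h1 : pvLt a b = false) (h2 : pvLt b a = false) : a = b := by
  rcases a with ⟨a1, a2⟩; rcases b with ⟨b1, b2⟩
  simp [pvLt] at *
  omega

-- a foldl that appends singletons is a map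
theorem foldl_append_singleton {α β : Type} (f : α → β) :
    ∀ (l : List α) (acc : List β),
      l.foldl (fun acc i => acc ++ [f i]) acc = acc ++ l.map f := by
  intro l
  induction l with
  | nil => simp
  | cons x t ih => intro acc; simp [ih]

-- insertBy with a strictly larger index preserves Pairwise pvR
theorem insertBy_pairwise (x : Int × Int) :
    ∀ (acc : List (Int × Int)), acc.Pairwise (fun a b => pvR a b = true) →
      (∀ y ∈ acc, y.1 < x.1) →
      (PySem.List.insertBy (fun a b => decide (a.2 < b.2)) x acc).Pairwise (fun a b => pvR a b = true) := by
  intro acc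
  induction acc with
  | nil => intro _ _; simp [PySem.List.insertBy]
  | cons y ys ih =>
    intro hp hlt
    rw [List.pairwise_cons] at hp
    by_cases hxy : x.2 < y.2
    · show (PySem.List.insertBy _ x (y :: ys)).Pairwise _
      simp only [PySem.List.insertBy, hxy, decide_true, if_true]
      rw [List.pairwise_cons]
      constructor
      · intro z hz
        rcases List.mem_cons.mp hz with h | h
        · subst h; simp [pvR]; omega
        · exact pvR_trans_snd hxy (hp.1 z h)
      · rw [List.pairwise_cons]; exact hp
    · show (PySem.List.insertBy _ x (y :: ys)).Pairwise _
      simp only [PySem.List.insertBy, hxy, decide_false]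
      rw [if_neg Bool.false_ne_true]
      rw [List.pairwise_cons]
      refine ⟨?_, ih hp.2 (fun z hz => hlt z (List.mem_cons_of_mem y hz))⟩
      intro z hz
      rcases (PySem.List.mem_insertBy _ x z ys).mp hz with h | h
      · subst h
        have hy : y.1 < z.1 := hlt y (List.mem_cons_self)
        simp [pvR]; omega
      · exact hp.1 z h

-- the insertion-sort fold on a list with strictly increasing indices is Pairwise pvR
theorem foldl_insertBy_pairwise :
    ∀ (xs acc : List (Int × Int)), acc.Pairwise (fun a b => pvR a b = true) →
      xs.Pairwise (fun a b => a.1 < b.1) →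
      (∀ y ∈ acc, ∀ z ∈ xs, y.1 < z.1) →
      (xs.foldl (fun acc x => PySem.List.insertBy (fun a b => decide (a.2 < b.2)) x acc) acc).Pairwise
        (fun a b => pvR a b = true) := by
  intro xs
  induction xs with
  | nil => intro acc hp _ _; simpa using hp
  | cons x t ih =>
    intro acc hp hxs hlt
    rw [List.pairwise_cons] at hxs
    simp only [List.foldl_cons]
    apply ih
    · exact insertBy_pairwise x acc hp (fun y hy => hlt y hy x List.mem_cons_self)
    · exact hxs.2
    · intro y hy z hz
      rcases (PySem.List.mem_insertBy _ x y acc).mp hy with h | h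
      · subst h; exact hxs.1 z hz
      · exact hlt y h z (List.mem_cons_of_mem x hz)

-- membership in the first K elements of a strictly pvR-decreasing list ↔ fewer than K elements beat x
theorem mem_take_iff_countP_lt :
    ∀ (L : List (Int × Int)) (K : Nat), L.Pairwise (fun a b => pvR b a = true) →
      ∀ x ∈ L, (x ∈ L.take K ↔ L.countP (fun y => pvR x y) < K) := by
  intro L
  induction L with
  | nil => intro K _ x hx; simp at hx
  | cons a t ih =>
    intro K hp x hx
    rw [List.pairwise_cons] at hp
    rcases List.mem_cons.mp hx with hxa | hxt
    · subst hxa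
      have hc : t.countP (fun y => pvR x y) = 0 := by
        apply List.countP_eq_zero.mpr
        intro y hy
        simp [pvR_asymm (hp.1 y hy)]
      cases K with
      | zero => simp [List.countP_cons]
      | succ K' => simp [List.countP_cons, hc, pvR_irrefl x]
    · have hxa : x ≠ a := by
        intro h; subst h
        simpa [pvR_irrefl] using hp.1 x hxt
      have hcount : (a :: t).countP (fun y => pvR x y) =
          t.countP (fun y => pvR x y) + 1 := by
        simp [List.countP_cons, hp.1 x hxt]
      cases K with
      | zero => simp [hcount]
      | succ K' =>
        rw [List.take_succ_cons, List.mem_cons, hcount]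
        constructor
        · intro h
          rcases h with h | h
          · exact absurd h hxa
          · exact Nat.succ_lt_succ ((ih K' hp.2 x hxt).mp h)
        · intro h
          exact Or.inr ((ih K' hp.2 x hxt).mpr (Nat.lt_of_succ_lt_succ h))

-- count exchange between two nodup lists
theorem countP_mem_comm {α : Type} [DecidableEq α] (u v : List α)
    (hu : u.Nodup) (hv : v.Nodup) :
    u.countP (fun x => decide (x ∈ v)) = v.countP (fun x => decide (x ∈ u)) := by
  rw [List.countP_eq_length_filter, List.countP_eq_length_filter]
  apply List.Perm.length_eq
  rw [List.perm_ext_iff_of_nodup (List.Nodup.filter _ hu) (List.Nodup.filter _ hv)]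
  intro a
  simp only [List.mem_filter, decide_eq_true_eq]
  tauto

-- splitting a count along a second predicate
theorem countP_split {α : Type} (l : List α) (q f : α → Bool) :
    l.countP q = l.countP (fun a => q a && f a) + l.countP (fun a => q a && !f a) := by
  induction l with
  | nil => simp
  | cons x t ih =>
    simp only [List.countP_cons, ih]
    cases hq : q x <;> cases hf : f x <;> simp <;> omega

theorem countP_le_of_imp {α : Type} (l : List α) (p q : α → Bool)
    (h : ∀ a ∈ l, p a = true → q a = true) : l.countP p ≤ l.countP q := by
  induction l with
  | nil => simp
  | cons x t ih =>
    simp only [List.countP_cons]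
    have ht := ih (fun a ha => h a (List.mem_cons_of_mem x ha))
    by_cases hp : p x = true
    · rw [hp, h x List.mem_cons_self hp]; omega
    · rw [Bool.of_not_eq_true hp]; simp; omega

theorem countP_eq_one_of_nodup {α : Type} [DecidableEq α] :
    ∀ (l : List α), l.Nodup → ∀ t ∈ l, l.countP (fun y => decide (y = t)) = 1 := by
  intro l
  induction l with
  | nil => intro _ t ht; simp at ht
  | cons x s ih =>
    intro hnd t ht
    rw [List.nodup_cons] at hnd
    rcases List.mem_cons.mp ht with h | h
    · subst h
      have hz : s.countP (fun y => decide (y = t)) = 0 := by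
        apply List.countP_eq_zero.mpr
        intro y hy
        simp only [decide_eq_true_eq]
        intro hc; subst hc; exact hnd.1 hy
      simp [List.countP_cons, hz]
    · have hxt : ¬ (x = t) := by intro hc; subst hc; exact hnd.1 h
      simp [List.countP_cons, ih hnd.2 t h, hxt]

theorem pv_pivot_mem {pairs : List (Int × Int)} (h : ¬ pairs.length = 0) :
    PySem.List.pyGetD pairs (PySem.Int.floordiv (PySem.List.len pairs) 2) ((0 : Int), (0 : Int)) ∈ pairs := by
  have hlen : 0 < ((pairs.length : Int)) := by omega
  have hdiv : 0 ≤ PySem.Int.floordiv ((pairs.length : Int)) 2 ∧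
      PySem.Int.floordiv ((pairs.length : Int)) 2 < (pairs.length : Int) := by
    unfold PySem.Int.floordiv
    rw [Int.fdiv_eq_ediv, if_pos (Or.inl (by norm_num))]
    omega
  rw [PySem.List.len_eq, PySem.List.pyGetD_eq_getElem _ _ hdiv.1 hdiv.2]
  exact List.getElem_mem _

theorem countP_not_add {α : Type} (l : List α) (p : α → Bool) :
    l.countP p + l.countP (fun a => !(p a)) = l.length := by
  induction l with
  | nil => simp
  | cons x t ih =>
    simp only [List.countP_cons]
    cases h : p x <;> simp [h] <;> omega

-- quickselect returns an element of the list whose "greater" count is exactly m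
theorem pvKth_spec : ∀ (n : Nat) (pairs : List (Int × Int)) (m : Int), pairs.length ≤ n →
    pairs.Nodup → 0 ≤ m → m < (pairs.length : Int) →
    pvKthFuel n pairs m ∈ pairs ∧
    ((pairs.countP (fun y => pvLt (pvKthFuel n pairs m) y) : Int)) = m := by
  intro n
  induction n with
  | zero => intro pairs m hn _ hm0 hmlen; omega
  | succ n ih =>
    intro pairs m hn hnd hm0 hmlen
    have hne : ¬ pairs.length = 0 := by omega
    simp only [pvKthFuel]
    rw [if_neg hne]
    have hpmem := pv_pivot_mem hne
    set p := PySem.List.pyGetD pairs (PySem.Int.floordiv (PySem.List.len pairs) 2) ((0 : Int), (0 : Int)) with hpdef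
    set gt := pairs.filter (fun y => pvLt p y) with hgt
    set lt := pairs.filter (fun y => pvLt y p) with hlt
    -- length decomposition: pairs = gt ⊎ {p} ⊎ lt
    have hnotsum : pairs.countP (fun y => !(pvLt p y)) = 1 + lt.length := by
      rw [countP_split pairs (fun y => !(pvLt p y)) (fun y => decide (y = p))]
      have e2 : pairs.countP (fun y => !(pvLt p y) && decide (y = p)) =
          pairs.countP (fun y => decide (y = p)) := by
        apply List.countP_congr
        intro a _
        simp only [Bool.and_eq_true, Bool.not_eq_true', decide_eq_true_eq]
        constructor
        · exact fun h => h.2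
        · intro h; subst h; exact ⟨pvLt_irrefl _, rfl⟩
      have e3 : pairs.countP (fun y => !(pvLt p y) && !(decide (y = p))) = lt.length := by
        have e3' : pairs.countP (fun y => !(pvLt p y) && !(decide (y = p))) =
            pairs.countP (fun y => pvLt y p) := by
          apply List.countP_congr
          intro a _
          simp only [Bool.and_eq_true, Bool.not_eq_true', decide_eq_false_iff_not]
          constructor
          · intro ⟨h1, h2⟩
            cases hv : pvLt a p
            · exact absurd (pvLt_connex hv h1) h2
            · rfl
          · intro h
            refine ⟨pvLt_asymm h, ?_⟩
            intro hc; subst hc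
            simp [pvLt_irrefl] at h
        rw [e3', hlt, List.countP_eq_length_filter]
      rw [e2, e3, countP_eq_one_of_nodup pairs hnd p hpmem]
    have hcnot := countP_not_add pairs (fun y => pvLt p y)
    have hglen : gt.length = pairs.countP (fun y => pvLt p y) := by
      rw [hgt, List.countP_eq_length_filter]
    have hsplitlen : pairs.length = gt.length + 1 + lt.length := by omega
    by_cases h1 : m < PySem.List.len gt
    · rw [if_pos h1]
      rw [PySem.List.len_eq] at h1
      obtain ⟨hrm, hrc⟩ := ih gt m (by omega) (hnd.filter _) hm0 h1
      have hpr : pvLt p (pvKthFuel n gt m) = true := (List.mem_filter.mp hrm).2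
      refine ⟨List.mem_of_mem_filter hrm, ?_⟩
      have hcc : gt.countP (fun y => pvLt (pvKthFuel n gt m) y) =
          pairs.countP (fun y => pvLt (pvKthFuel n gt m) y) := by
        rw [hgt, List.countP_filter]
        apply List.countP_congr
        intro a _
        simp only [Bool.and_eq_true]
        exact ⟨fun h => h.1, fun h => ⟨h, pvLt_trans hpr h⟩⟩
      rw [← hcc]
      exact hrc
    · rw [if_neg h1]
      by_cases h2 : m = PySem.List.len gt
      · rw [if_pos h2]
        refine ⟨hpmem, ?_⟩
        rw [List.countP_eq_length_filter, ← hgt]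
        rw [PySem.List.len_eq] at h2
        omega
      · rw [if_neg h2]
        rw [PySem.List.len_eq] at h1 h2
        have hmg : (gt.length : Int) < m := by omega
        obtain ⟨hrm, hrc⟩ := ih lt (m - PySem.List.len gt - 1) (by omega) (hnd.filter _)
          (by rw [PySem.List.len_eq]; omega) (by rw [PySem.List.len_eq]; push_cast; omega)
        set r := pvKthFuel n lt (m - PySem.List.len gt - 1) with hr
        have hrp : pvLt r p = true := (List.mem_filter.mp hrm).2
        refine ⟨List.mem_of_mem_filter hrm, ?_⟩
        rw [countP_split pairs (fun y => pvLt r y) (fun y => pvLt p y)]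
        have c2 : pairs.countP (fun y => pvLt r y && pvLt p y) = gt.length := by
          rw [hglen]
          apply List.countP_congr
          intro a _
          simp only [Bool.and_eq_true]
          exact ⟨fun h => h.2, fun h => ⟨pvLt_trans hrp h, h⟩⟩
        have c3 : pairs.countP (fun y => pvLt r y && !(pvLt p y)) =
            1 + lt.countP (fun y => pvLt r y) := by
          rw [countP_split pairs (fun y => pvLt r y && !(pvLt p y)) (fun y => decide (y = p))]
          have c31 : pairs.countP (fun y => (pvLt r y && !(pvLt p y)) && decide (y = p)) =
              pairs.countP (fun y => decide (y = p)) := by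
            apply List.countP_congr
            intro a _
            simp only [Bool.and_eq_true, Bool.not_eq_true', decide_eq_true_eq]
            constructor
            · exact fun h => h.2
            · intro h; subst h; exact ⟨⟨hrp, pvLt_irrefl _⟩, rfl⟩
          have c32 : pairs.countP (fun y => (pvLt r y && !(pvLt p y)) && !(decide (y = p))) =
              lt.countP (fun y => pvLt r y) := by
            rw [hlt, List.countP_filter]
            apply List.countP_congr
            intro a _
            simp only [Bool.and_eq_true, Bool.not_eq_true', decide_eq_false_iff_not]
            constructor
            · intro ⟨⟨hra, hpa⟩, hap⟩
              refine ⟨hra, ?_⟩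
              cases hv : pvLt a p
              · exact absurd (pvLt_connex hv hpa) hap
              · rfl
            · intro ⟨hra, hap⟩
              refine ⟨⟨hra, pvLt_asymm hap⟩, ?_⟩
              intro hc; subst hc
              simp [pvLt_irrefl] at hap
          rw [c31, c32, countP_eq_one_of_nodup pairs hnd p hpmem]
        rw [c2, c3]
        rw [PySem.List.len_eq] at hrc
        push_cast
        push_cast at hrc
        omega

-- being ≥ t in the lexicographic order ↔ having a rank no worse than t's
theorem ge_iff_rank_le (pairs : List (Int × Int)) (hnd : pairs.Nodup) (t x : Int × Int)
    (htm : t ∈ pairs) :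
    ((x = t ∨ pvLt t x = true)) ↔
      pairs.countP (fun y => pvLt x y) ≤ pairs.countP (fun y => pvLt t y) := by
  constructor
  · rintro (rfl | h)
    · exact le_refl _
    · exact countP_le_of_imp pairs _ _ (fun a _ ha => pvLt_trans h ha)
  · intro h
    by_cases hxt : x = t
    · exact Or.inl hxt
    by_cases hlt : pvLt t x = true
    · exact Or.inr hlt
    exfalso
    have hxlt : pvLt x t = true := by
      cases hv : pvLt x t
      · exact absurd (pvLt_connex hv (Bool.of_not_eq_true hlt)) hxt
      · rfl
    have key : pairs.countP (fun y => pvLt t y) + 1 ≤ pairs.countP (fun y => pvLt x y) := by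
      rw [countP_split pairs (fun y => pvLt x y) (fun y => pvLt t y)]
      have k1 : pairs.countP (fun y => pvLt x y && pvLt t y) =
          pairs.countP (fun y => pvLt t y) := by
        apply List.countP_congr
        intro a _
        simp only [Bool.and_eq_true]
        exact ⟨fun hh => hh.2, fun hh => ⟨pvLt_trans hxlt hh, hh⟩⟩
      have k2 : 1 ≤ pairs.countP (fun y => pvLt x y && !(pvLt t y)) := by
        have := countP_le_of_imp pairs (fun y => decide (y = t))
            (fun y => pvLt x y && !(pvLt t y)) ?_
        · rw [countP_eq_one_of_nodup pairs hnd t htm] at this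
          exact this
        · intro a _ ha
          simp only [decide_eq_true_eq] at ha
          subst ha
          simp [hxlt, pvLt_irrefl]
      omega
    omega

-- Set.ofList of a nodup list is itself
theorem set_ofList_of_nodup {α : Type} [BEq α] [LawfulBEq α] :
    ∀ (xs : List α), xs.Nodup → PySem.Set.ofList xs = xs := by
  have aux : ∀ (xs acc : List α), acc.Nodup → (∀ a ∈ acc, a ∉ xs) → xs.Nodup →
      xs.foldl PySem.Set.add acc = acc ++ xs := by
    intro xs
    induction xs with
    | nil => intro acc _ _ _; simp
    | cons x t ih =>
      intro acc hacc hdis hxs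
      simp only [List.foldl_cons]
      have hx : x ∉ acc := fun hc => hdis x hc List.mem_cons_self
      have hadd : PySem.Set.add acc x = acc ++ [x] := by
        simp [PySem.Set.add, List.contains_eq_mem, hx]
      rw [hadd]
      rw [List.nodup_cons] at hxs
      have := ih (acc ++ [x])
        (by
          rw [List.nodup_append]
          refine ⟨hacc, by simp, ?_⟩
          intro a ha b hb
          have hbx : b = x := by simpa using hb
          subst hbx
          intro h; subst h; exact hx ha)
        (by
          intro a ha
          rcases List.mem_append.mp ha with h | h
          · exact fun hc => hdis a h (List.mem_cons_of_mem x hc)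
          · simp only [List.mem_singleton] at h; subst h; exact hxs.1)
        hxs.2
      simpa using this
  intro xs h
  have := aux xs [] (by simp) (by simp) h
  simpa [PySem.Set.ofList_eq_foldl, PySem.Set.empty] using this

-- the double-set-building foldl splits into two independent folds
theorem foldl_pair_add {α : Type} [BEq α] (f g : Int → α) :
    ∀ (r : List Int) (s t : PySem.Set α),
      r.foldl (fun (st : PySem.Set α × PySem.Set α) i =>
        (PySem.Set.add st.1 (f i), PySem.Set.add st.2 (g i))) (s, t) =
      (r.foldl (fun s i => PySem.Set.add s (f i)) s,
       r.foldl (fun t i => PySem.Set.add t (g i)) t) := by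
  intro r
  induction r with
  | nil => intro s t; rfl
  | cons x rs ih => intro s t; simp only [List.foldl_cons]; exact ih _ _

-- a counting foldl is countP
theorem foldl_count_int {α : Type} (p : α → Prop) [DecidablePred p] :
    ∀ (l : List α) (n : Int),
      l.foldl (fun r y => if p y then r + 1 else r) n = n + (l.countP (fun y => decide (p y)) : Int) := by
  intro l
  induction l with
  | nil => intro n; simp
  | cons x t ih =>
    intro n
    simp only [List.foldl_cons, List.countP_cons]
    by_cases h : p x
    · simp [h, ih]; push_cast; ring
    · simp [h, ih]

-- a range map of list gets is take
theorem map_pyGetD_range_take (L : List (Int × Int)) (K : Nat) (hK : K ≤ L.length) :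
    (PySem.List.pyRange 0 (K : Int) 1).map (fun i => PySem.List.pyGetD L i ((0 : Int), (0 : Int))) = L.take K := by
  rw [PySem.List.pyRange_zero_natCast, List.map_map]
  apply List.ext_getElem
  · simp [Nat.min_eq_left hK]
  · intro n h1 h2
    simp only [List.getElem_map, List.getElem_range, Function.comp]
    rw [PySem.List.pyGetD_of_nonneg _ _ (by positivity)]
    simp only [Int.toNat_natCast]
    have hn : n < K := by simpa using h1
    rw [List.getD_eq_getElem _ _ (by omega), List.getElem_take]

theorem foldl_add_eq_ofList {α : Type} [BEq α] (f : Int → α) (r : List Int) :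
    r.foldl (fun s i => PySem.Set.add s (f i)) PySem.Set.empty = PySem.Set.ofList (r.map f) := by
  rw [PySem.Set.ofList_eq_foldl, List.foldl_map]
  rfl

theorem foldl_add_eq_ofList' {α : Type} [BEq α] (r : List α) :
    r.foldl (fun s i => PySem.Set.add s i) PySem.Set.empty = PySem.Set.ofList r := by
  rw [PySem.Set.ofList_eq_foldl]
  rfl

theorem main_equiv : ∀ (items : List Int) (k : Int),
    k ≤ (items.length : Int) →
    metric_performance items k = metric_performance_alt items k := by
  intro items k hk
  by_cases hk0 : k ≤ 0
  · unfold metric_performance metric_performance_alt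
    rw [PySem.List.pyRange_one_eq_nil hk0]
    simp [PySem.Set.inter, PySem.Set.len, PySem.Set.empty, hk0]
  · push_neg at hk0
    have hkK : ((k.toNat : Int)) = k := Int.toNat_of_nonneg (le_of_lt hk0)
    set K := k.toNat with hKdef
    set E := PySem.List.enumerate items 0 with hE
    set S := PySem.List.sorted E (fun item => item.2) false with hS
    set L := S.reverse with hL
    have hEmap : E = (PySem.List.pyRange 0 (PySem.List.len items) 1).map
        (fun j => (j, PySem.List.pyGetD items j 0)) := PySem.List.enumerate_eq_map_pyRange items 0
    have hSperm : S.Perm E := PySem.List.sorted_perm E _ false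
    have hLperm : L.Perm E := (List.reverse_perm S).trans hSperm
    have hElen : E.length = items.length := PySem.List.length_enumerate items 0
    have hLlen : L.length = items.length := by
      rw [hL, List.length_reverse, hS, PySem.List.length_sorted, hElen]
    have hKlen : K ≤ L.length := by rw [hLlen]; omega
    have hEfst : E.Pairwise (fun a b => a.1 < b.1) := by
      have h1 : (E.map (fun x => x.1)).Pairwise (· < ·) := by
        rw [hE, PySem.List.map_fst_enumerate]
        exact PySem.List.pairwise_lt_pyRange_one _ _
      rwa [List.pairwise_map] at h1
    have hSpw : S.Pairwise (fun a b => pvR a b = true) := by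
      rw [hS, PySem.List.sorted_eq_foldl_insertBy]
      exact foldl_insertBy_pairwise E [] (by simp) hEfst (by simp)
    have hLpw : L.Pairwise (fun a b => pvR b a = true) := by
      rw [hL, List.pairwise_reverse]; exact hSpw
    have hLfst_nodup : (L.map (fun x => x.1)).Nodup := by
      rw [(hLperm.map (fun x => x.1)).nodup_iff]
      rw [hE, PySem.List.map_fst_enumerate]
      exact PySem.List.nodup_pyRange_one _ _
    have hLd_nodup : ((L.take K).map (fun x => x.1)).Nodup := by
      rw [List.map_take]
      exact (List.take_sublist K _).nodup hLfst_nodup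
    -- i is among the first K indices iff its pair is among the first K pairs
    have hmem : ∀ i : Int, 0 ≤ i → i < k →
        (i ∈ (L.take K).map (fun x => x.1) ↔ (i, PySem.List.pyGetD items i 0) ∈ L.take K) := by
      intro i h0 hik
      constructor
      · intro h
        rcases List.mem_map.mp h with ⟨p, hp, hpi⟩
        have hpE : p ∈ E := hLperm.mem_iff.mp (List.mem_of_mem_take hp)
        rw [hEmap] at hpE
        rcases List.mem_map.mp hpE with ⟨j, _, hpj⟩
        have hji : j = i := by rw [← hpj] at hpi; simpa using hpi
        rw [← hpj, hji] at hp
        exact hp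
      · intro h
        exact List.mem_map.mpr ⟨_, h, rfl⟩
    have hEiE : ∀ i : Int, 0 ≤ i → i < k → (i, PySem.List.pyGetD items i 0) ∈ E := by
      intro i h0 hik
      rw [hEmap]
      apply List.mem_map.mpr
      refine ⟨i, ?_, rfl⟩
      rw [PySem.List.len_eq]
      exact PySem.List.mem_pyRange_one.mpr ⟨h0, by omega⟩
    have hEi : ∀ i : Int, 0 ≤ i → i < k → (i, PySem.List.pyGetD items i 0) ∈ L := by
      intro i h0 hik
      rw [hLperm.mem_iff]
      exact hEiE i h0 hik
    -- the quickselect threshold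
    set pairs := E.map (fun iv => (iv.2, iv.1)) with hpairs
    have hEnd : E.Nodup := by
      apply List.Nodup.of_map (f := fun x : Int × Int => x.1)
      rw [hE, PySem.List.map_fst_enumerate]
      exact PySem.List.nodup_pyRange_one _ _
    have hpnd : pairs.Nodup := by
      rw [hpairs]
      apply hEnd.map
      intro a b hab
      rcases a with ⟨a1, a2⟩; rcases b with ⟨b1, b2⟩
      simp [Prod.ext_iff] at hab ⊢
      omega
    have hplen : (pairs.length : Int) = (items.length : Int) := by
      rw [hpairs, List.length_map, hElen]
    obtain ⟨htm, htc⟩ : pvKth pairs (k - 1) ∈ pairs ∧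
        ((pairs.countP (fun y => pvLt (pvKth pairs (k - 1)) y) : Int)) = k - 1 :=
      pvKth_spec pairs.length pairs (k - 1) le_rfl hpnd (by omega) (by omega)
    set t := pvKth pairs (k - 1) with ht
    -- the A side
    have hA : metric_performance items k =
        k - (((L.take K).map (fun x => x.1)).countP
              (fun x => decide (x ∈ PySem.List.pyRange 0 k 1)) : Int) := by
      show (let n_items : Int := PySem.List.len items
            let rank_est : List (Int × Int) :=
              (PySem.List.pyRange 0 n_items 1).foldl
                (fun acc i => acc ++ [(i, PySem.List.pyGetD items i 0)]) []
            let rank_est := PySem.List.sorted rank_est (fun item => item.2) false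
            let rank_est := rank_est.reverse
            let sets : PySem.Set Int × PySem.Set Int :=
              (PySem.List.pyRange 0 k 1).foldl
                (fun st i =>
                  (PySem.Set.add st.1 (PySem.List.pyGetD rank_est i (0, 0)).1,
                   PySem.Set.add st.2 i))
                (PySem.Set.empty, PySem.Set.empty)
            k - PySem.Set.len (PySem.Set.inter sets.1 sets.2)) = _
      simp only []
      rw [foldl_append_singleton]
      rw [List.nil_append, ← PySem.List.enumerate_eq_map_pyRange items 0, ← hE, ← hS, ← hL]
      rw [foldl_pair_add]
      rw [foldl_add_eq_ofList (fun i => (PySem.List.pyGetD L i ((0:Int), (0:Int))).1)]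
      rw [foldl_add_eq_ofList']
      have hmapmap : (PySem.List.pyRange 0 k 1).map
            (fun i => (PySem.List.pyGetD L i ((0:Int), (0:Int))).1) =
          (L.take K).map (fun x => x.1) := by
        rw [show ((PySem.List.pyRange 0 k 1).map
              (fun i => (PySem.List.pyGetD L i ((0:Int), (0:Int))).1)) =
            (((PySem.List.pyRange 0 k 1).map
              (fun i => PySem.List.pyGetD L i ((0:Int), (0:Int)))).map (fun x => x.1)) by
          rw [List.map_map]
          rfl]
        rw [← hkK, map_pyGetD_range_take L K hKlen]
      rw [hmapmap]
      rw [set_ofList_of_nodup _ hLd_nodup]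
      rw [set_ofList_of_nodup _ (PySem.List.nodup_pyRange_one 0 k)]
      simp only [PySem.Set.inter, PySem.Set.len, List.countP_eq_length_filter]
      have hfc : List.filter (fun x => PySem.Set.contains (PySem.List.pyRange 0 k 1) x)
            ((L.take K).map (fun x => x.1)) =
          List.filter (fun x => decide (x ∈ PySem.List.pyRange 0 k 1))
            ((L.take K).map (fun x => x.1)) := by
        apply List.filter_congr
        intro x _
        simp [PySem.Set.contains, List.contains_eq_mem]
      rw [hfc]
    -- the B side
    have hB : metric_performance_alt items k =
        k - (((PySem.List.pyRange 0 k 1).countP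
          (fun i => decide (t.1 < PySem.List.pyGetD items i 0 ∨
            (PySem.List.pyGetD items i 0 = t.1 ∧ t.2 ≤ i)))) : Int) := by
      show (if k ≤ 0 then k else
            let pairs := (PySem.List.enumerate items 0).map (fun iv => (iv.2, iv.1))
            let t := pvKth pairs (k - 1)
            let hits :=
              (PySem.List.pyRange 0 k 1).foldl
                (fun hits i =>
                  if t.1 < PySem.List.pyGetD items i 0 ∨
                     (PySem.List.pyGetD items i 0 = t.1 ∧ t.2 ≤ i) then hits + 1 else hits)
                0
            k - hits) = _
      rw [if_neg (by omega)]
      simp only []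
      rw [← hE, ← hpairs, ← ht]
      rw [foldl_count_int (fun i : Int => t.1 < PySem.List.pyGetD items i 0 ∨
            (PySem.List.pyGetD items i 0 = t.1 ∧ t.2 ≤ i))]
      rw [zero_add]
    rw [hA, hB]
    rw [countP_mem_comm _ _ hLd_nodup (PySem.List.nodup_pyRange_one 0 k)]
    have hpt : ∀ i ∈ PySem.List.pyRange 0 k 1,
        (decide (i ∈ (L.take K).map (fun x => x.1)) = true ↔
         decide (t.1 < PySem.List.pyGetD items i 0 ∨
            (PySem.List.pyGetD items i 0 = t.1 ∧ t.2 ≤ i)) = true) := by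
      intro i hi
      rcases PySem.List.mem_pyRange_one.mp hi with ⟨h0, hik⟩
      have h1 := hmem i h0 hik
      have h2 := mem_take_iff_countP_lt L K hLpw _ (hEi i h0 hik)
      have h3 := hLperm.countP_eq (fun y => pvR (i, PySem.List.pyGetD items i 0) y)
      have h4 : pairs.countP (fun y => pvLt (PySem.List.pyGetD items i 0, i) y) =
          E.countP (fun y => pvR (i, PySem.List.pyGetD items i 0) y) := by
        rw [hpairs, List.countP_map]
        rfl
      have hx : ((PySem.List.pyGetD items i 0, i) : Int × Int) ∈ pairs := by
        rw [hpairs]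
        exact List.mem_map.mpr ⟨(i, PySem.List.pyGetD items i 0), hEiE i h0 hik, rfl⟩
      have h5 := ge_iff_rank_le pairs hpnd t (PySem.List.pyGetD items i 0, i) htm
      simp only [decide_eq_true_eq]
      rw [h1, h2, h3, ← h4]
      constructor
      · intro hlt
        have hle : pairs.countP (fun y => pvLt (PySem.List.pyGetD items i 0, i) y) ≤
            pairs.countP (fun y => pvLt t y) := by omega
        have := h5.mpr hle
        rcases this with heq | hgt
        · have h1 := congrArg Prod.fst heq
          have h2 := congrArg Prod.snd heq
          simp at h1 h2
          omega
        · simp [pvLt] at hgt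
          omega
      · intro hge
        have hor : ((PySem.List.pyGetD items i 0, i) : Int × Int) = t ∨
            pvLt t (PySem.List.pyGetD items i 0, i) = true := by
          by_cases hxe : ((PySem.List.pyGetD items i 0, i) : Int × Int) = t
          · exact Or.inl hxe
          · refine Or.inr ?_
            simp [Prod.ext_iff] at hxe
            simp [pvLt]
            omega
        have := h5.mp hor
        omega
    rw [List.countP_congr hpt]

-- ===== VERDICT (by name: the statement is the Claim_ definition above) =====
theorem metric_performance_spec : Claim_equal_metric_performance := by
  unfold Claim_equal_metric_performance
  intro items k _ hpre
  unfold Spec_metric_performance Pre_metric_performance at *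
  exact main_equiv items k hpre
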